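-- pv_equiv track=rewrite | github.com/mbjackson-capp/adventofcode | 2017/day9.py | clean_post_exclams
-- ===== SOURCE A (Python) =====
-- SKIPPED = "_"
--
-- def clean_post_exclams(stream: str) -> str:
--     """Create a new version of the stream, canceling out characters immediately
--     after an exclamation point as described in problem text."""
--     new_stream = ""
--     skip_ahead = False
--     am_inside_garbage = False
--     for _, char in enumerate(stream):
--         if skip_ahead:
--             new_stream += SKIPPED
--             skip_ahead = False
--             continue
--
--         if char == "!":
--             skip_ahead = True
--
--         if char == "<" and not am_inside_garbage:
--             am_inside_garbage = True
--
--         if char == ">":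
--             am_inside_garbage = False
--
--         new_stream += char
--     return new_stream
-- ===== SOURCE B (Python) =====
-- SKIPPED = "_"
--
-- def clean_post_exclams(stream: str) -> str:
--     """Index-based two-step scan: on '!' emit '!' and replace the following
--     character (if any) by SKIPPED, advancing by two; otherwise copy the
--     character. No garbage-state bookkeeping (it never affects the output)."""
--     out = []
--     i = 0
--     n = len(stream)
--     while i < n:
--         c = stream[i]
--         if c == "!" and i + 1 < n:
--             out.append("!")
--             out.append(SKIPPED)
--             i += 2
--         else:
--             out.append(c)
--             i += 1
--     return "".join(out)
-- ===== Notes on version B (the rewrite author's own statement) =====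
-- stated objective: simpler
-- what changed: Replaced the one-char-per-step state machine (skip flag plus dead garbage-tracking flags) by an index loop that consumes '!' together with its following character in one step, eliminating all state flags.
import Mathlib
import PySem

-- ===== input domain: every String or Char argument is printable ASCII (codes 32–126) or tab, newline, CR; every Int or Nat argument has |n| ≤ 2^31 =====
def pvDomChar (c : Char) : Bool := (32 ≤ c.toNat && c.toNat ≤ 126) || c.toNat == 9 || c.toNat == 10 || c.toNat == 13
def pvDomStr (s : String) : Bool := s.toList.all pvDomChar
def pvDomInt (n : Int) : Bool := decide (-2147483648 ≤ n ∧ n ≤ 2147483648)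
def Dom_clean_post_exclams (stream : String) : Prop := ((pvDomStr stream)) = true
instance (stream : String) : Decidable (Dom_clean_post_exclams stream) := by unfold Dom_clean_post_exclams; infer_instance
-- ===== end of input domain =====

-- B replaces A's one-char-per-step state machine (skip flag + dead garbage flags) by a
-- two-char-per-step scan that consumes '!' with its follower at once; objective: simpler.

-- ===== PORT A =====
-- state: (new_stream, skip_ahead, am_inside_garbage); one step of A's for-loop body
def pvAStep (st : List Char × Bool × Bool) (c : Char) : List Char × Bool × Bool :=
  if st.2.1 then (st.1 ++ ['_'], false, st.2.2)
  else
    let skip := c == '!'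
    let g1 := if c == '<' && !st.2.2 then true else st.2.2
    let g2 := if c == '>' then false else g1
    (st.1 ++ [c], skip, g2)

def clean_post_exclams (stream : String) : String :=
  String.ofList (stream.toList.foldl pvAStep ([], false, false)).1

-- ===== PORT B =====
-- Source B's index loop, as the equivalent structural recursion consuming one or two chars
def pvBGo : List Char → List Char
  | [] => []
  | '!' :: _ :: rest => '!' :: '_' :: pvBGo rest
  | c :: rest => c :: pvBGo rest

def clean_post_exclams_alt (stream : String) : String :=
  String.ofList (pvBGo stream.toList)

-- ===== PRECONDITION & SPEC =====
def Spec_clean_post_exclams (stream : String) (out : String) : Prop := out = clean_post_exclams_alt stream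
instance (stream : String) (out : String) : Decidable (Spec_clean_post_exclams stream out) := by unfold Spec_clean_post_exclams; infer_instance

-- ===== CLAIM (what is proved, stated in full; the proofs are below) =====
def Claim_equal_clean_post_exclams : Prop := ∀ (stream : String), Dom_clean_post_exclams stream → Spec_clean_post_exclams stream (clean_post_exclams stream)

-- ===== LEMMAS AND PROOFS =====

-- A's fold from a non-skipping state produces acc ++ B's output, for any garbage flag
theorem pvFold_eq_go (l : List Char) : ∀ (acc : List Char) (g : Bool),
    (l.foldl pvAStep (acc, false, g)).1 = acc ++ pvBGo l := by
  induction l using pvBGo.induct with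
  | case1 => intro acc g; simp [pvBGo]
  | case2 c rest ih =>
      intro acc g
      simp only [List.foldl, pvBGo]
      -- processing '!' sets the skip flag; the next step emits '_' and clears it
      simp only [pvAStep, if_neg (by simp : ¬ (false = true)), beq_self_eq_true]
      rw [if_pos trivial, ih]
      simp
  | case3 c rest hne ih =>
      intro acc g
      by_cases hc : c = '!'
      · -- '!' with no following character: the loop ends with the skip flag set
        subst hc
        cases rest with
        | nil => simp [pvAStep, pvBGo]
        | cons d rest' => exact absurd rfl (fun h => hne d rest' h rfl)
      · have hcb : (c == '!') = false := by simpa using hc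
        simp only [List.foldl]
        simp only [pvAStep, if_neg (by simp : ¬ (false = true)), hcb]
        rw [ih]
        have hgo : pvBGo (c :: rest) = c :: pvBGo rest := by
          cases rest with
          | nil => rw [pvBGo.eq_3] <;> simp [hc]
          | cons d rest' => rw [pvBGo.eq_3] <;> simp [hc]
        rw [hgo]
        simp

-- ===== VERDICT (by name: the statement is the Claim_ definition above) =====
theorem clean_post_exclams_spec : Claim_equal_clean_post_exclams := by
  intro s _
  unfold Spec_clean_post_exclams clean_post_exclams clean_post_exclams_alt
  rw [pvFold_eq_go]
  rfl
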